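-- pv_equiv track=rewrite | github.com/ArmandoRuizM/Proyecto2-IA | main.py | distanceToObject
-- ===== SOURCE A (Python) =====
-- def findPlayer(player, environment):
--     actualEnvironment=environment.copy()
--     playerPos = [-1,-1]
--     ##Se recorre el arreglo hasta que lo que hay en una posición del ambiente sea igual a lo que se busca
--     for i in range(len(actualEnvironment)):
--         for j in range(len(actualEnvironment[i])):
--             if(actualEnvironment[i][j]==player):
--                 playerPos[0]=i
--                 playerPos[1]=j
--     return playerPos
--
-- def distanceToObject(status):
--     cpuPos=findPlayer(2,status[0])
--     auxDis=999999
--     for i in range(len(status[0])):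
--         for j in range(len(status[0][i])):
--             if(status[0][i][j]!=1 and status[0][i][j]!=2 and status[0][i][j]!=0):
--                 newDis=manhattan(cpuPos[0], cpuPos[1], i, j)
--                 auxDis=min(newDis, auxDis)
--     return auxDis
--
-- def manhattan(x0,y0,x1,y1):
--     distance=abs(x1-x0)+abs(y1-y0)
--     return distance
-- ===== SOURCE B (Python) =====
-- def _findCpu(grid):
--     # first 2 in reverse scan order = last 2 in A's forward scan order
--     for i in range(len(grid) - 1, -1, -1):
--         row = grid[i]
--         for j in range(len(row) - 1, -1, -1):
--             if row[j] == 2: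
--                 return i, j
--     return (-1, -1)
--
--
-- def _isObject(grid, i, j):
--     return 0 <= i < len(grid) and 0 <= j < len(grid[i]) and grid[i][j] not in (0, 1, 2)
--
--
-- def distanceToObject(status):
--     # expanding-diamond search: grow Manhattan rings around the CPU and return
--     # the first radius at which a ring cell holds an object (capped by the 999999 default)
--     grid = status[0]
--     ci, cj = _findCpu(grid)
--     width = 0
--     for row in grid:
--         width = max(width, len(row))
--     maxd = len(grid) + width
--     for d in range(maxd + 1):
--         for di in range(max(-d, -ci), min(d, len(grid) - 1 - ci) + 1):
--             rem = d - abs(di)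
--             if _isObject(grid, ci + di, cj - rem) or (rem > 0 and _isObject(grid, ci + di, cj + rem)):
--                 return min(d, 999999)
--     return 999999
-- ===== Notes on version B (the rewrite author's own statement) =====
-- stated objective: alternative
-- what changed: Replaces A's exhaustive scan (min Manhattan distance over every object cell, CPU located by a full overwrite scan) with an expanding-diamond search: the CPU is found by a reverse scan with early exit, then Manhattan rings of growing radius around the CPU are probed and the first radius containing an object cell is returned (capped by the 999999 default).
import Mathlib
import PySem

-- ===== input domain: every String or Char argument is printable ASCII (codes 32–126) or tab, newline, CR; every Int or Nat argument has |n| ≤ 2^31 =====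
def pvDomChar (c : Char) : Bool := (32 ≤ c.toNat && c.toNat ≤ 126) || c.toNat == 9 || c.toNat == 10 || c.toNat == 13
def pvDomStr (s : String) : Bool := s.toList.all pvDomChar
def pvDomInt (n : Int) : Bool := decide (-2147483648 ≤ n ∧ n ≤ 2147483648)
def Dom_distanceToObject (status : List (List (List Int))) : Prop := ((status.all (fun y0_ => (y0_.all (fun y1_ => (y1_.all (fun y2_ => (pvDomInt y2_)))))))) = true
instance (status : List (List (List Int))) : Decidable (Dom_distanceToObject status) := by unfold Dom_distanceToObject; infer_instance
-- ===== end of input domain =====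

-- B replaces A's exhaustive scan (min Manhattan distance over all object cells, CPU found by a
-- full overwrite scan) with an expanding-diamond search: the CPU is located by a reverse scan with
-- early exit, then rings of growing Manhattan radius around the CPU are probed and the first radius
-- that contains an object cell is returned (capped by the 999999 default); alternative algorithm.

-- ===== PORT A =====
def pvManhattan (x0 y0 x1 y1 : Int) : Int := |x1 - x0| + |y1 - y0|

def pvFindPlayer (player : Int) (environment : List (List Int)) : Int × Int :=
  (PySem.List.enumerate environment).foldl
    (fun pos p =>
      (PySem.List.enumerate p.2).foldl
        (fun pos q => if q.2 = player then (p.1, q.1) else pos) pos)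
    (-1, -1)

def distanceToObject (status : List (List (List Int))) : Int :=
  let grid := status.headD []
  let cpuPos := pvFindPlayer 2 grid
  (PySem.List.enumerate grid).foldl
    (fun auxDis p =>
      (PySem.List.enumerate p.2).foldl
        (fun auxDis q =>
          if q.2 ≠ 1 ∧ q.2 ≠ 2 ∧ q.2 ≠ 0 then
            min (pvManhattan cpuPos.1 cpuPos.2 p.1 q.1) auxDis
          else auxDis) auxDis)
    999999

-- ===== PORT B =====
-- first 2 in reverse scan order (= A's last 2 in forward order), early exit
def pvFindCpu (grid : List (List Int)) : Int × Int :=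
  (((PySem.List.enumerate grid).reverse).findSome? (fun p =>
      ((PySem.List.enumerate p.2).reverse.find? (fun q => decide (q.2 = 2))).map
        (fun q => (p.1, q.1)))).getD (-1, -1)

-- 0 <= i < len(grid) and 0 <= j < len(grid[i]) and grid[i][j] not in (0, 1, 2)
def pvIsObject (grid : List (List Int)) (i j : Int) : Bool :=
  decide (0 ≤ i) && decide (i < (grid.length : Int)) &&
    (match PySem.List.pyGet? grid i with
     | some row =>
        decide (0 ≤ j) && decide (j < (row.length : Int)) &&
          (match PySem.List.pyGet? row j with
           | some v => decide (¬(v = 0 ∨ v = 1 ∨ v = 2))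
           | none => false)
     | none => false)

-- does the Manhattan ring of radius d around (ci, cj) contain an object cell?
def pvRingHit (grid : List (List Int)) (ci cj d : Int) : Bool :=
  (PySem.List.pyRange (max (-d) (-ci)) (min d ((grid.length : Int) - 1 - ci) + 1) 1).any
    (fun di =>
      pvIsObject grid (ci + di) (cj - (d - |di|)) ||
        (decide (0 < d - |di|) && pvIsObject grid (ci + di) (cj + (d - |di|))))

def distanceToObject_alt (status : List (List (List Int))) : Int :=
  let grid := status.headD []
  let cpu := pvFindCpu grid
  let width := grid.foldl (fun w row => max w ((row.length : Int))) 0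
  let maxd := (grid.length : Int) + width
  match (PySem.List.pyRange 0 (maxd + 1) 1).find? (fun d => pvRingHit grid cpu.1 cpu.2 d) with
  | some d => min d 999999
  | none => 999999

-- ===== PRECONDITION & SPEC =====
-- Pre_ excludes only the empty status list, on which the Python A raises IndexError at status[0].
def Pre_distanceToObject (status : List (List (List Int))) : Prop := status ≠ []
instance (status : List (List (List Int))) : Decidable (Pre_distanceToObject status) := by unfold Pre_distanceToObject; infer_instance
def pvWitness_distanceToObject : List (List (List Int)) := [[[2, 3], [0, 1]]]

def Spec_distanceToObject (status : List (List (List Int))) (out : Int) : Prop := out = distanceToObject_alt status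
instance (status : List (List (List Int))) (out : Int) : Decidable (Spec_distanceToObject status out) := by unfold Spec_distanceToObject; infer_instance

-- ===== CLAIM (what is proved, stated in full; the proofs are below) =====
def Claim_equal_distanceToObject : Prop := ∀ (status : List (List (List Int))), Dom_distanceToObject status → Pre_distanceToObject status → Spec_distanceToObject status (distanceToObject status)

-- ===== LEMMAS AND PROOFS =====

-- the grid flattened to one list of (row index, column index, value) cells, in scan order
def pvCells (grid : List (List Int)) : List (Int × Int × Int) :=
  (PySem.List.enumerate grid).flatMap
    (fun p => (PySem.List.enumerate p.2).map (fun q => (p.1, q.1, q.2)))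

theorem pvFindPlayer_flat (player : Int) (grid : List (List Int)) :
    pvFindPlayer player grid =
      (pvCells grid).foldl (fun pos c => if c.2.2 = player then (c.1, c.2.1) else pos) (-1, -1) := by
  simp only [pvFindPlayer, pvCells, List.foldl_flatMap, List.foldl_map]

theorem pvA_flat (grid : List (List Int)) (cpu : Int × Int) :
    ((PySem.List.enumerate grid).foldl
      (fun auxDis p =>
        (PySem.List.enumerate p.2).foldl
          (fun auxDis q =>
            if q.2 ≠ 1 ∧ q.2 ≠ 2 ∧ q.2 ≠ 0 then
              min (pvManhattan cpu.1 cpu.2 p.1 q.1) auxDis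
            else auxDis) auxDis)
      (999999 : Int)) =
    (pvCells grid).foldl
      (fun auxDis c =>
        if c.2.2 ≠ 1 ∧ c.2.2 ≠ 2 ∧ c.2.2 ≠ 0 then
          min (pvManhattan cpu.1 cpu.2 c.1 c.2.1) auxDis
        else auxDis) 999999 := by
  simp only [pvCells, List.foldl_flatMap, List.foldl_map]

-- a running min over an if-guarded projection is the min over the filtered, mapped list
theorem pvFoldl_min_if {C : Type} (p : C → Prop) [DecidablePred p] (f : C → Int)
    (l : List C) (a : Int) :
    l.foldl (fun acc c => if p c then min (f c) acc else acc) a =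
      ((l.filter (fun c => decide (p c))).map f).foldl min a := by
  induction l generalizing a with
  | nil => rfl
  | cons x t ih =>
    rw [List.foldl_cons]
    by_cases hx : p x
    · rw [if_pos hx, List.filter_cons_of_pos (by simp [hx]), List.map_cons,
          List.foldl_cons, ih, min_comm]
    · rw [if_neg hx, List.filter_cons_of_neg (by simp [hx]), ih]

-- an overwrite-on-match fold computes the last match, i.e. the first match of the reversed list
theorem pvFoldl_overwrite {α β : Type} (p : α → Prop) [DecidablePred p] (f : α → β)
    (l : List α) (init : β) :
    l.foldl (fun pos c => if p c then f c else pos) init =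
      ((l.reverse.find? (fun c => decide (p c))).map f).getD init := by
  induction l generalizing init with
  | nil => rfl
  | cons x t ih =>
    rw [List.foldl_cons, ih, List.reverse_cons, List.find?_append]
    cases h : t.reverse.find? (fun c => decide (p c)) with
    | some c => simp [Option.or]
    | none =>
      by_cases hx : p x <;> simp [hx, Option.or]

theorem pvFind?_flatMap {α β : Type} (l : List α) (g : α → List β) (p : β → Bool) :
    (l.flatMap g).find? p = l.findSome? (fun a => (g a).find? p) := by
  induction l with
  | nil => rfl
  | cons x t ih =>
    rw [List.flatMap_cons, List.find?_append, ih, List.findSome?_cons]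
    cases h : (g x).find? p <;> simp [Option.or]

theorem pvMap_findSome? {α β γ : Type} (l : List α) (h : α → Option β) (f : β → γ) :
    (l.findSome? h).map f = l.findSome? (fun a => (h a).map f) := by
  induction l with
  | nil => rfl
  | cons x t ih =>
    rw [List.findSome?_cons, List.findSome?_cons]
    cases hx : h x <;> simp [ih]

-- B's CPU search written as a first match over the reversed flat cell list
theorem pvFindCpu_cells (grid : List (List Int)) :
    pvFindCpu grid =
      (((pvCells grid).reverse.find? (fun c => decide (c.2.2 = 2))).map
        (fun c => (c.1, c.2.1))).getD (-1, -1) := by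
  rw [pvCells, List.reverse_flatMap, pvFind?_flatMap]
  rw [show ((fun p : Int × List Int =>
        (List.find? (fun c : Int × Int × Int => decide (c.2.2 = 2))
          ((List.reverse ∘ fun p : Int × List Int =>
            (PySem.List.enumerate p.2).map (fun q => (p.1, q.1, q.2))) p)))) =
      (fun p : Int × List Int =>
        (((PySem.List.enumerate p.2).reverse.find? (fun q : Int × Int => decide (q.2 = 2))).map
          (fun q => (p.1, q.1, q.2)))) from by
    funext p
    rw [Function.comp_apply, ← List.map_reverse, List.find?_map]
    rfl]
  rw [pvFindCpu, pvMap_findSome?]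
  simp only [Option.map_map]
  rfl

theorem pvCpu_eq (grid : List (List Int)) :
    pvFindPlayer 2 grid = pvFindCpu grid := by
  rw [pvFindPlayer_flat, pvFoldl_overwrite (fun c : Int × Int × Int => c.2.2 = 2)
      (fun c : Int × Int × Int => (c.1, c.2.1)), pvFindCpu_cells]

theorem pvMem_cells {grid : List (List Int)} {c : Int × Int × Int} :
    c ∈ pvCells grid ↔
      ∃ (a : Nat) (ha : a < grid.length) (b : Nat) (hb : b < grid[a].length),
        c = ((a : Int), (b : Int), grid[a][b]) := by
  constructor
  · intro hc
    rw [pvCells, List.mem_flatMap] at hc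
    rcases hc with ⟨p, hp, hcp⟩
    rw [PySem.List.mem_enumerate_iff] at hp
    rcases hp with ⟨a, ha, rfl⟩
    rw [List.mem_map] at hcp
    rcases hcp with ⟨q, hq, rfl⟩
    rw [PySem.List.mem_enumerate_iff] at hq
    rcases hq with ⟨b, hb, rfl⟩
    exact ⟨a, ha, b, hb, by simp⟩
  · rintro ⟨a, ha, b, hb, rfl⟩
    rw [pvCells, List.mem_flatMap]
    refine ⟨((a : Int), grid[a]), ?_, ?_⟩
    · rw [PySem.List.mem_enumerate_iff]; exact ⟨a, ha, by simp⟩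
    · rw [List.mem_map]
      exact ⟨((b : Int), grid[a][b]), by
        rw [PySem.List.mem_enumerate_iff]; exact ⟨b, hb, by simp⟩, rfl⟩

theorem pvIsObject_iff {grid : List (List Int)} {i j : Int} :
    pvIsObject grid i j = true ↔
      ∃ (a : Nat) (ha : a < grid.length) (b : Nat) (hb : b < grid[a].length),
        i = (a : Int) ∧ j = (b : Int) ∧ ¬(grid[a][b] = 0 ∨ grid[a][b] = 1 ∨ grid[a][b] = 2) := by
  constructor
  · intro h
    rw [pvIsObject] at h
    by_cases h1 : 0 ≤ i
    · by_cases h2 : i < (grid.length : Int)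
      · have hget : PySem.List.pyGet? grid i = some (grid[i.toNat]'(by omega)) :=
          PySem.List.pyGet?_eq_some_getElem grid h1 (by simpa using h2)
        rw [hget] at h
        simp only [Bool.and_eq_true] at h
        obtain ⟨-, h⟩ := h
        by_cases h3 : 0 ≤ j
        · by_cases h4 : j < ((grid[i.toNat]'(by omega)).length : Int)
          · have hget2 : PySem.List.pyGet? (grid[i.toNat]'(by omega)) j =
                some ((grid[i.toNat]'(by omega))[j.toNat]'(by omega)) :=
              PySem.List.pyGet?_eq_some_getElem _ h3 (by simpa using h4)
            rw [hget2] at h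
            simp only [decide_eq_true_eq] at h
            exact ⟨i.toNat, by omega, j.toNat, by omega, by omega, by omega, h.2⟩
          · simp [h4] at h
        · simp [h3] at h
      · simp [h2] at h
    · simp [h1] at h
  · rintro ⟨a, ha, b, hb, rfl, rfl, hv⟩
    rw [pvIsObject]
    have hget : PySem.List.pyGet? grid ((a : Nat) : Int) = some grid[a] := by
      rw [PySem.List.pyGet?_natCast]; simp [ha]
    have hget2 : PySem.List.pyGet? grid[a] ((b : Nat) : Int) = some grid[a][b] := by
      rw [PySem.List.pyGet?_natCast]; simp [hb]
    simp only [hget]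
    simp only [hget2]
    simp only [decide_eq_true_eq, Bool.and_eq_true]
    exact ⟨⟨by omega, by exact_mod_cast ha⟩, ⟨by omega, by exact_mod_cast hb⟩, hv⟩

theorem pvRingHit_iff {grid : List (List Int)} {ci cj d : Int} :
    pvRingHit grid ci cj d = true ↔
      ∃ (a : Nat) (ha : a < grid.length) (b : Nat) (hb : b < grid[a].length),
        ¬(grid[a][b] = 0 ∨ grid[a][b] = 1 ∨ grid[a][b] = 2) ∧
        |(a : Int) - ci| + |(b : Int) - cj| = d := by
  rw [pvRingHit, List.any_eq_true]
  constructor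
  · rintro ⟨di, hdi, hpred⟩
    rw [PySem.List.mem_pyRange_one] at hdi
    have hd1 : -d ≤ di := le_trans (le_max_left _ _) hdi.1
    have hd2 : di ≤ d := by have := hdi.2; omega
    have habs : |di| ≤ d := abs_le.mpr ⟨hd1, hd2⟩
    have hrem : 0 ≤ d - |di| := by omega
    rw [Bool.or_eq_true, Bool.and_eq_true, decide_eq_true_eq] at hpred
    rcases hpred with hL | ⟨hpos, hR⟩
    · rcases pvIsObject_iff.mp hL with ⟨a, ha, b, hb, hia, hjb, hv⟩
      refine ⟨a, ha, b, hb, hv, ?_⟩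
      have h1 : (a : Int) - ci = di := by omega
      have h2 : (b : Int) - cj = -(d - |di|) := by omega
      rw [h1, h2, abs_neg, abs_of_nonneg hrem]
      omega
    · rcases pvIsObject_iff.mp hR with ⟨a, ha, b, hb, hia, hjb, hv⟩
      refine ⟨a, ha, b, hb, hv, ?_⟩
      have h1 : (a : Int) - ci = di := by omega
      have h2 : (b : Int) - cj = d - |di| := by omega
      rw [h1, h2, abs_of_nonneg hrem]
      omega
  · rintro ⟨a, ha, b, hb, hv, hdist⟩
    refine ⟨(a : Int) - ci, ?_, ?_⟩
    · rw [PySem.List.mem_pyRange_one]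
      have h1 : |(a : Int) - ci| ≤ d := by
        have := abs_nonneg ((b : Int) - cj); omega
      have h2 : -(|(a : Int) - ci|) ≤ (a : Int) - ci := neg_abs_le _
      have h3 : (a : Int) - ci ≤ |(a : Int) - ci| := le_abs_self _
      constructor
      · apply max_le <;> omega
      · have : ((a : Int)) < (grid.length : Int) := by exact_mod_cast ha
        have h4 : (a : Int) - ci ≤ min d ((grid.length : Int) - 1 - ci) := by
          apply le_min <;> omega
        omega
    · have hrem : d - |(a : Int) - ci| = |(b : Int) - cj| := by omega
      rw [Bool.or_eq_true, Bool.and_eq_true, decide_eq_true_eq]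
      by_cases hside : (b : Int) ≤ cj
      · left
        apply pvIsObject_iff.mpr
        refine ⟨a, ha, b, hb, by omega, ?_, hv⟩
        rw [hrem, abs_of_nonpos (by omega)]
        omega
      · right
        constructor
        · rw [hrem]; rw [abs_of_nonneg (by omega)]; omega
        · apply pvIsObject_iff.mpr
          refine ⟨a, ha, b, hb, by omega, ?_, hv⟩
          rw [hrem, abs_of_nonneg (by omega)]
          omega

-- membership in A's distance list is exactly a ring hit at that radius
theorem pvMem_dists_iff_hit (grid : List (List Int)) (ci cj x : Int) :
    x ∈ (((pvCells grid).filter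
            (fun c => decide (c.2.2 ≠ 1 ∧ c.2.2 ≠ 2 ∧ c.2.2 ≠ 0))).map
          (fun c => |c.1 - ci| + |c.2.1 - cj|)) ↔
      pvRingHit grid ci cj x = true := by
  rw [List.mem_map, pvRingHit_iff]
  constructor
  · rintro ⟨c, hc, rfl⟩
    rw [List.mem_filter, decide_eq_true_eq] at hc
    rcases pvMem_cells.mp hc.1 with ⟨a, ha, b, hb, rfl⟩
    exact ⟨a, ha, b, hb, by have := hc.2; tauto, rfl⟩
  · rintro ⟨a, ha, b, hb, hv, hdist⟩
    refine ⟨((a : Int), (b : Int), grid[a][b]), ?_, hdist⟩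
    rw [List.mem_filter, decide_eq_true_eq]
    exact ⟨pvMem_cells.mpr ⟨a, ha, b, hb, rfl⟩, by tauto⟩

-- first hit of find? over an increasing integer range: value, bounds and minimality
theorem pvFind?_pyRange_some {p : Int → Bool} :
    ∀ (n : Nat) (a b d : Int), (b - a).toNat = n →
      (PySem.List.pyRange a b 1).find? p = some d →
      p d = true ∧ a ≤ d ∧ d < b ∧ ∀ e, a ≤ e → e < d → p e = false := by
  intro n
  induction n with
  | zero =>
    intro a b d h hf
    rw [PySem.List.pyRange_one_eq_nil (by omega)] at hf
    simp at hf
  | succ k ih =>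
    intro a b d h hf
    have hab : a < b := by omega
    rw [PySem.List.pyRange_one_cons hab, List.find?_cons] at hf
    cases hp : p a with
    | true =>
      rw [hp] at hf
      simp only [Option.some.injEq] at hf
      subst hf
      exact ⟨hp, le_refl _, hab, fun e he1 he2 => absurd he1 (by omega)⟩
    | false =>
      rw [hp] at hf
      obtain ⟨h1, h2, h3, h4⟩ := ih (a + 1) b d (by omega) hf
      refine ⟨h1, by omega, h3, fun e he1 he2 => ?_⟩
      rcases eq_or_lt_of_le he1 with rfl | hlt
      · exact hp
      · exact h4 e (by omega) he2

-- cpu position: either the default (-1,-1) or the coordinates of a cell of the grid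
theorem pvCpu_cases (grid : List (List Int)) :
    pvFindCpu grid = (-1, -1) ∨
      ∃ (a : Nat) (ha : a < grid.length) (b : Nat) (_hb : b < grid[a].length),
        pvFindCpu grid = ((a : Int), (b : Int)) := by
  rw [pvFindCpu_cells]
  cases h : (pvCells grid).reverse.find? (fun c => decide (c.2.2 = 2)) with
  | none => left; rfl
  | some c =>
    right
    have hc : c ∈ pvCells grid := List.mem_reverse.mp (List.mem_of_find?_eq_some h)
    rcases pvMem_cells.mp hc with ⟨a, ha, b, hb, rfl⟩
    exact ⟨a, ha, b, hb, rfl⟩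

-- every row length is bounded by the computed width, and the width is nonnegative
theorem pvWidth_bounds (grid : List (List Int)) :
    0 ≤ grid.foldl (fun w row => max w ((row.length : Int))) 0 ∧
      ∀ row ∈ grid, (row.length : Int) ≤ grid.foldl (fun w row => max w ((row.length : Int))) 0 := by
  have hmap : grid.foldl (fun w row => max w ((row.length : Int))) 0 =
      (grid.map (fun r => ((r.length : Int)))).foldl max 0 := by
    rw [List.foldl_map]
  obtain ⟨h1, h2⟩ := PySem.List.le_foldl_max (grid.map (fun r => ((r.length : Int)))) 0
  refine ⟨by rw [hmap]; exact h1, fun row hrow => ?_⟩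
  rw [hmap]
  exact h2 _ (List.mem_map.mpr ⟨row, hrow, rfl⟩)

-- every distance in A's list is nonnegative and at most len(grid) + width
theorem pvDist_bounds (grid : List (List Int)) {x : Int}
    (hx : x ∈ (((pvCells grid).filter
            (fun c => decide (c.2.2 ≠ 1 ∧ c.2.2 ≠ 2 ∧ c.2.2 ≠ 0))).map
          (fun c => |c.1 - (pvFindCpu grid).1| + |c.2.1 - (pvFindCpu grid).2|))) :
    0 ≤ x ∧ x ≤ (grid.length : Int) + grid.foldl (fun w row => max w ((row.length : Int))) 0 := by
  rw [List.mem_map] at hx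
  rcases hx with ⟨c, hc, rfl⟩
  rw [List.mem_filter] at hc
  rcases pvMem_cells.mp hc.1 with ⟨a, ha, b, hb, rfl⟩
  dsimp only
  obtain ⟨hw0, hwrow⟩ := pvWidth_bounds grid
  set W := grid.foldl (fun w row => max w ((row.length : Int))) 0 with hW
  have hrow : ((grid[a].length : Int)) ≤ W := hwrow _ (List.mem_of_getElem rfl)
  have hbW : (b : Int) < W := by
    have : (b : Int) < (grid[a].length : Int) := by exact_mod_cast hb
    omega
  have haH : (a : Int) < (grid.length : Int) := by exact_mod_cast ha
  -- bounds on the cpu coordinates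
  have hcpu : (-1 ≤ (pvFindCpu grid).1 ∧ (pvFindCpu grid).1 ≤ (grid.length : Int) - 1) ∧
      (-1 ≤ (pvFindCpu grid).2 ∧ (pvFindCpu grid).2 ≤ W - 1) := by
    rcases pvCpu_cases grid with hdef | ⟨a', ha', b', hb', heq⟩
    · rw [hdef]
      exact ⟨⟨by dsimp only; omega, by dsimp only; omega⟩,
        by dsimp only; omega, by dsimp only; omega⟩
    · rw [heq]
      have h1 : ((a' : Int)) < (grid.length : Int) := by exact_mod_cast ha'
      have hrow' : ((grid[a'].length : Int)) ≤ W := hwrow _ (List.mem_of_getElem rfl)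
      have h2 : (b' : Int) < (grid[a'].length : Int) := by exact_mod_cast hb'
      exact ⟨⟨by dsimp only; omega, by dsimp only; omega⟩,
        by dsimp only; omega, by dsimp only; omega⟩
  obtain ⟨⟨hci1, hci2⟩, hcj1, hcj2⟩ := hcpu
  constructor
  · have hn1 := abs_nonneg ((a : Int) - (pvFindCpu grid).1)
    have hn2 := abs_nonneg ((b : Int) - (pvFindCpu grid).2)
    omega
  · have h1 : |(a : Int) - (pvFindCpu grid).1| ≤ (grid.length : Int) := by
      rw [abs_le]; omega
    have h2 : |(b : Int) - (pvFindCpu grid).2| ≤ W := by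
      rw [abs_le]; omega
    omega

-- ===== VERDICT (by name: the statement is the Claim_ definition above) =====
theorem distanceToObject_spec : Claim_equal_distanceToObject := by
  intro status _ _
  unfold Spec_distanceToObject
  show distanceToObject status = distanceToObject_alt status
  simp only [distanceToObject, distanceToObject_alt]
  set grid := status.headD [] with hgrid
  rw [pvA_flat, pvCpu_eq]
  set cpu := pvFindCpu grid with hcpu
  rw [show (fun (auxDis : Int) (c : Int × Int × Int) =>
        if c.2.2 ≠ 1 ∧ c.2.2 ≠ 2 ∧ c.2.2 ≠ 0 then
          min (pvManhattan cpu.1 cpu.2 c.1 c.2.1) auxDis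
        else auxDis) =
      (fun (auxDis : Int) (c : Int × Int × Int) =>
        if c.2.2 ≠ 1 ∧ c.2.2 ≠ 2 ∧ c.2.2 ≠ 0 then
          min (|c.1 - cpu.1| + |c.2.1 - cpu.2|) auxDis
        else auxDis) from rfl]
  rw [pvFoldl_min_if (fun c : Int × Int × Int => c.2.2 ≠ 1 ∧ c.2.2 ≠ 2 ∧ c.2.2 ≠ 0)
      (fun c : Int × Int × Int => |c.1 - cpu.1| + |c.2.1 - cpu.2|)]
  set S := (((pvCells grid).filter
      (fun c => decide (c.2.2 ≠ 1 ∧ c.2.2 ≠ 2 ∧ c.2.2 ≠ 0))).map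
      (fun c => |c.1 - cpu.1| + |c.2.1 - cpu.2|)) with hS
  set W := grid.foldl (fun w row => max w ((row.length : Int))) 0 with hW
  set maxd := (grid.length : Int) + W with hmaxd
  cases hfind : (PySem.List.pyRange 0 (maxd + 1) 1).find? (fun d => pvRingHit grid cpu.1 cpu.2 d) with
  | none =>
    have hempty : S = [] := by
      rw [List.eq_nil_iff_forall_not_mem]
      intro x hx
      obtain ⟨hx0, hxle⟩ := pvDist_bounds grid (by simp only [hS, hcpu] at hx; exact hx)
      have hxmem : x ∈ PySem.List.pyRange 0 (maxd + 1) 1 :=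
        PySem.List.mem_pyRange_one.mpr ⟨hx0, by omega⟩
      have := List.find?_eq_none.mp hfind x hxmem
      exact this ((pvMem_dists_iff_hit grid cpu.1 cpu.2 x).mp hx)
    rw [hempty]
    rfl
  | some dmin =>
    obtain ⟨hhit, hd0, hdlt, hmin⟩ :=
      pvFind?_pyRange_some ((maxd + 1) - 0).toNat 0 (maxd + 1) dmin rfl hfind
    have hdS : dmin ∈ S := (pvMem_dists_iff_hit grid cpu.1 cpu.2 dmin).mpr hhit
    have hSne : S ≠ [] := fun h => by rw [h] at hdS; exact List.not_mem_nil hdS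
    rw [List.foldl_min]
    cases hm : S.min? with
    | none => exact absurd (List.min?_eq_none_iff.mp hm) hSne
    | some m =>
      obtain ⟨hmS, hmle⟩ := List.min?_eq_some_iff.mp hm
      have h1 : m ≤ dmin := hmle _ hdS
      have h2 : dmin ≤ m := by
        by_contra hct
        have hlt : m < dmin := by omega
        have hm0 : 0 ≤ m := (pvDist_bounds grid (by simp only [hS, hcpu] at hmS; exact hmS)).1
        have : pvRingHit grid cpu.1 cpu.2 m = true :=
          (pvMem_dists_iff_hit grid cpu.1 cpu.2 m).mp hmS
        rw [hmin m hm0 hlt] at this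
        exact Bool.false_ne_true this
      have : m = dmin := le_antisymm h1 h2
      subst this
      simp only [Option.getD_some]
      exact min_comm _ _
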